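-- pv_equiv track=rewrite | github.com/Del161/Eindopdracht-fase-3 | script3_0.py | unique_or_shared
-- ===== SOURCE A (Python) =====
-- def unique_or_shared(identifier_1_gene, identifier_2_gene):
--     """
--     take the extracted genes, and create new lists with the shared genes, and unique genes
--     :param identifier_1_gene: list of genes for identifier 1
--     :param identifier_2_gene: list of genes for identifier 2
--     :return: list of shared genes, list of unique genes 1 and 2
--     """
--
--     # prepare lists for use
--     identifier_1_gene = list(identifier_1_gene)
--     identifier_2_gene = list(identifier_2_gene)
--     common_genes = []
--     unique_genes_1 = []
--     unique_genes_2 = []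
--
--     # extract the genes that appear in both lists
--     if len(identifier_1_gene) > len(identifier_2_gene):
--         # check if the genes in the shorter list are in the longer list
--         for genes in identifier_2_gene:
--             if identifier_1_gene.count(genes) > 0:
--                 common_genes.append(genes)
--     else:
--         for genes in identifier_1_gene:
--             if identifier_2_gene.count(genes) > 0:
--                 common_genes.append(genes)
--
--     # extract the genes that are unique to each list
--     for genes in identifier_1_gene:
--         if genes not in common_genes:
--             unique_genes_1.append(genes)
--     for genes in identifier_2_gene:
--         if genes not in common_genes:
--             unique_genes_2.append(genes)
--
--     return common_genes, unique_genes_1, unique_genes_2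
-- ===== SOURCE B (Python) =====
-- def unique_or_shared(identifier_1_gene, identifier_2_gene):
--     """
--     take the extracted genes, and create new lists with the shared genes, and unique genes
--     :return: list of shared genes, list of unique genes 1 and 2
--     """
--     identifier_1_gene = list(identifier_1_gene)
--     identifier_2_gene = list(identifier_2_gene)
--     set1 = set(identifier_1_gene)
--     set2 = set(identifier_2_gene)
--     # one partition pass per list: each gene goes to 'hits' or 'unique' at once
--     hits1, unique_genes_1 = [], []
--     for g in identifier_1_gene:
--         (hits1 if g in set2 else unique_genes_1).append(g)
--     hits2, unique_genes_2 = [], []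
--     for g in identifier_2_gene:
--         (hits2 if g in set1 else unique_genes_2).append(g)
--     # the shared list is the hits of whichever list A iterates (the shorter on ties -> list 1)
--     common_genes = hits2 if len(identifier_1_gene) > len(identifier_2_gene) else hits1
--     return common_genes, unique_genes_1, unique_genes_2
-- ===== Notes on version B (the rewrite author's own statement) =====
-- stated objective: faster
-- what changed: B makes one partition pass per list that simultaneously routes each gene into a hits or a unique accumulator (using a precomputed set of the other list), then selects the shared list from the two hits lists after the fact; A instead pre-branches on the lengths, scans the other list with count() for each gene, and then rescans both lists against the growing common_genes list.
import Mathlib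
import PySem

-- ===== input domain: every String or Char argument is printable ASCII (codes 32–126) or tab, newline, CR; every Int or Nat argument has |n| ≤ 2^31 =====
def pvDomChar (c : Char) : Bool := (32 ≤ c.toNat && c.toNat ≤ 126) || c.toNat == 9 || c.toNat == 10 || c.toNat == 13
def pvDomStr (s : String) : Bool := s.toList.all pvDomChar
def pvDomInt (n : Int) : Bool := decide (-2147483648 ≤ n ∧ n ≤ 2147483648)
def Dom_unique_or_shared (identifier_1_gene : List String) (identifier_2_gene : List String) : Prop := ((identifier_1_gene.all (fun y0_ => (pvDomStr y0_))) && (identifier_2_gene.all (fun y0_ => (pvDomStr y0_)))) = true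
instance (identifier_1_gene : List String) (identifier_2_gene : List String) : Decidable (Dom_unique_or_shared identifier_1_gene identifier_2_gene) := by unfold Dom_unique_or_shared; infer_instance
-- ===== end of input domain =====

-- B replaces A's count scans and rescans against common_genes by one partition pass per list
-- routing each gene into a hits/unique accumulator at once (faster: no repeated list scans).

-- ===== PORT A =====
def unique_or_shared (identifier_1_gene : List String) (identifier_2_gene : List String) : List (List String) :=
  let common_genes : List String :=
    if identifier_1_gene.length > identifier_2_gene.length then
      identifier_2_gene.foldl (fun acc g => if PySem.List.count identifier_1_gene g > 0 then acc ++ [g] else acc) []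
    else
      identifier_1_gene.foldl (fun acc g => if PySem.List.count identifier_2_gene g > 0 then acc ++ [g] else acc) []
  let unique_genes_1 := identifier_1_gene.foldl (fun acc g => if !(common_genes.contains g) then acc ++ [g] else acc) []
  let unique_genes_2 := identifier_2_gene.foldl (fun acc g => if !(common_genes.contains g) then acc ++ [g] else acc) []
  [common_genes, unique_genes_1, unique_genes_2]

-- ===== PORT B =====
-- one pass over xs, routing each element into the hits (in s) or unique (not in s) accumulator
def pvScan (xs : List String) (s : PySem.Set String) : List String × List String :=
  xs.foldl (fun p g => if PySem.Set.contains s g then (p.1 ++ [g], p.2) else (p.1, p.2 ++ [g])) ([], [])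

def unique_or_shared_alt (identifier_1_gene : List String) (identifier_2_gene : List String) : List (List String) :=
  let set1 : PySem.Set String := PySem.Set.ofList identifier_1_gene
  let set2 : PySem.Set String := PySem.Set.ofList identifier_2_gene
  let r1 := pvScan identifier_1_gene set2
  let r2 := pvScan identifier_2_gene set1
  let common_genes := if identifier_1_gene.length > identifier_2_gene.length then r2.1 else r1.1
  [common_genes, r1.2, r2.2]

-- ===== PRECONDITION & SPEC =====
def Spec_unique_or_shared (identifier_1_gene : List String) (identifier_2_gene : List String) (out : List (List String)) : Prop := out = unique_or_shared_alt identifier_1_gene identifier_2_gene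
instance (identifier_1_gene : List String) (identifier_2_gene : List String) (out : List (List String)) : Decidable (Spec_unique_or_shared identifier_1_gene identifier_2_gene out) := by unfold Spec_unique_or_shared; infer_instance

-- ===== CLAIM =====
def Claim_equal_unique_or_shared : Prop := ∀ (identifier_1_gene : List String) (identifier_2_gene : List String), Dom_unique_or_shared identifier_1_gene identifier_2_gene → Spec_unique_or_shared identifier_1_gene identifier_2_gene (unique_or_shared identifier_1_gene identifier_2_gene)

-- ===== LEMMAS AND PROOFS =====
-- B's partition pass, in filter form
lemma pvScan_eq (xs : List String) (s : PySem.Set String) :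
    pvScan xs s = (xs.filter (fun g => PySem.Set.contains s g),
                   xs.filter (fun g => !(PySem.Set.contains s g))) := by
  unfold pvScan
  suffices h : ∀ a b : List String,
      xs.foldl (fun p g => if PySem.Set.contains s g then (p.1 ++ [g], p.2) else (p.1, p.2 ++ [g])) (a, b)
        = (a ++ xs.filter (fun g => PySem.Set.contains s g),
           b ++ xs.filter (fun g => !(PySem.Set.contains s g))) by
    simpa using h [] []
  induction xs with
  | nil => simp
  | cons x xs ih =>
      intro a b
      rcases hx : PySem.Set.contains s x with _ | _ <;>
        simp only [List.foldl_cons, List.filter_cons, hx, Bool.not_false, Bool.not_true,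
          Bool.false_eq_true, if_false, if_true, ih] <;>
        simp [List.append_assoc]

-- A's common-genes list, in filter form (membership in the other list's set)
lemma common_eq (id1 id2 : List String) :
    (if id1.length > id2.length then
      id2.foldl (fun acc g => if PySem.List.count id1 g > 0 then acc ++ [g] else acc) ([] : List String)
    else
      id1.foldl (fun acc g => if PySem.List.count id2 g > 0 then acc ++ [g] else acc) [])
    = (if id1.length > id2.length then
        id2.filter (fun g => PySem.Set.contains (PySem.Set.ofList id1) g)
      else
        id1.filter (fun g => PySem.Set.contains (PySem.Set.ofList id2) g)) := by
  split_ifs with h <;>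
  · rw [PySem.List.foldl_append_ite_eq_filter]
    simp only [List.nil_append]
    apply List.filter_congr
    intro g hg
    simp [PySem.List.count_eq, List.count_pos_iff, PySem.Set.contains]

-- membership in A's common list is joint membership
lemma mem_common (id1 id2 : List String) (g : String) :
    (g ∈ (if id1.length > id2.length then
          id2.filter (fun x => PySem.Set.contains (PySem.Set.ofList id1) x)
        else
          id1.filter (fun x => PySem.Set.contains (PySem.Set.ofList id2) x)))
    ↔ (g ∈ id1 ∧ g ∈ id2) := by
  split_ifs with h
  · simp [List.mem_filter, PySem.Set.contains]
    tauto
  · simp [List.mem_filter, PySem.Set.contains]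

-- A's unique pass over l, in B's filter form; `other` is the opposite list's set
lemma unique_eq (l id1 id2 other : List String)
    (hother : ∀ g, g ∈ l → (g ∈ other ↔ (g ∈ id1 ∧ g ∈ id2))) :
    l.foldl (fun acc g => if !((if id1.length > id2.length then
          id2.filter (fun x => PySem.Set.contains (PySem.Set.ofList id1) x)
        else
          id1.filter (fun x => PySem.Set.contains (PySem.Set.ofList id2) x)).contains g)
        then acc ++ [g] else acc) []
    = l.filter (fun g => !(PySem.Set.contains (PySem.Set.ofList other) g)) := by
  rw [PySem.List.foldl_append_if_eq_filter]
  simp only [List.nil_append]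
  apply List.filter_congr
  intro g hg
  have hmem := mem_common id1 id2 g
  have ho := hother g hg
  congr 1
  simp only [PySem.Set.contains] at hmem ⊢
  rcases hc : (if id1.length > id2.length then
          id2.filter (fun x => ((PySem.Set.ofList id1).contains x : Bool))
        else
          id1.filter (fun x => ((PySem.Set.ofList id2).contains x : Bool))).contains g with _|_ <;>
  rcases hc2 : ((PySem.Set.ofList other).contains g : Bool) with _|_ <;>
    simp_all [PySem.Set.mem_ofList]

-- ===== VERDICT =====
theorem unique_or_shared_spec : Claim_equal_unique_or_shared := by
  intro id1 id2 _
  unfold Spec_unique_or_shared unique_or_shared unique_or_shared_alt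
  simp only [pvScan_eq, common_eq]
  rw [unique_eq id1 id1 id2 id2 (fun g hg => by simp [hg]),
      unique_eq id2 id1 id2 id1 (fun g hg => by simp [hg])]
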